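-- pv_equiv track=rewrite | github.com/JackAgren/drone_cones_project | backend/api/drone_operator/views.py | fill_assignment
-- ===== SOURCE A (Python) =====
-- def fill_assignment(cone_count, large, med, small, drone_list):
--     LARGE_CAP = 8
--     MEDIUM_CAP = 4
--     SMALL_CAP = 1
--     while cone_count >= 0:
--         if len(small) > 0:
--             cone_count -= SMALL_CAP
--             drone_list.append(small.pop())
--         elif len(med) > 0:
--             drone_list.append(med.pop())
--             cone_count -= MEDIUM_CAP
--         elif len(large) > 0:
--             drone_list.append(large.pop())
--             cone_count -= LARGE_CAP
--         else: #This line is where cone_count is less than a larger size but there are no more smaller drones.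
--             return cone_count
--     return cone_count # We reach here if the cones all get drones.
-- ===== SOURCE B (Python) =====
-- def fill_assignment(cone_count, large, med, small, drone_list):
--     # Closed-form per-phase counts instead of a per-element while loop;
--     # performs the same list mutations as the original (pops -> bulk slices).
--     if cone_count < 0:
--         return cone_count
--     ks = min(len(small), cone_count + 1)
--     n = len(small)
--     drone_list.extend(small[n - ks:][::-1])
--     del small[n - ks:]
--     cone_count -= ks
--     if cone_count < 0:
--         return cone_count
--     km = min(len(med), cone_count // 4 + 1)
--     n = len(med)
--     drone_list.extend(med[n - km:][::-1])
--     del med[n - km:]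
--     cone_count -= 4 * km
--     if cone_count < 0:
--         return cone_count
--     kl = min(len(large), cone_count // 8 + 1)
--     n = len(large)
--     drone_list.extend(large[n - kl:][::-1])
--     del large[n - kl:]
--     cone_count -= 8 * kl
--     return cone_count
-- ===== Notes on version B (the rewrite author's own statement) =====
-- stated objective: alternative
-- what changed: Replaced the per-element while-loop with closed-form pop counts per phase (min(len(small), cc+1), then min(len(med), cc//4+1), then min(len(large), cc//8+1)), applying each phase with bulk slice operations instead of one pop per iteration.
import Mathlib
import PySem

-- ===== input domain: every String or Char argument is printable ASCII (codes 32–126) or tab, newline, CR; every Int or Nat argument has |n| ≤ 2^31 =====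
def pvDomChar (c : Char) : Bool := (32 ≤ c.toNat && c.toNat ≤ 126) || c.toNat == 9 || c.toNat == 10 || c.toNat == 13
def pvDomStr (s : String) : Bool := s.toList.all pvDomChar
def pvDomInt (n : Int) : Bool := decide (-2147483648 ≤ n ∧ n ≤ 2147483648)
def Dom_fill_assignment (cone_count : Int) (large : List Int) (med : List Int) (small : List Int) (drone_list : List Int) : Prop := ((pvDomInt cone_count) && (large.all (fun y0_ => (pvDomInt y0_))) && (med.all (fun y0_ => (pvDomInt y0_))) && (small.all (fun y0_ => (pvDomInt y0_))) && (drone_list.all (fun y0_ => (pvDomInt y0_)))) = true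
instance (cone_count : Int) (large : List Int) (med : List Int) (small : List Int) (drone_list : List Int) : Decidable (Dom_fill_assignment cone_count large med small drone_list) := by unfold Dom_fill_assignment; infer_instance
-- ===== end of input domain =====

-- B replaces A's per-element while-loop by closed-form per-phase pop counts (small, med, large);
-- return-value equivalence is what is proved; both Pythons perform the same in-place list mutations.

-- ===== PORT A =====
-- literal port of A's while loop: each iteration pops the last element of the
-- preferred nonempty list (small, then med, then large) and subtracts its cap
def fill_assignment (cone_count : Int) (large : List Int) (med : List Int) (small : List Int) (drone_list : List Int) : Int :=
  if 0 ≤ cone_count then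
    if small.length > 0 then
      fill_assignment (cone_count - 1) large med small.dropLast (drone_list ++ [small.getLast!])
    else if med.length > 0 then
      fill_assignment (cone_count - 4) large med.dropLast small (drone_list ++ [med.getLast!])
    else if large.length > 0 then
      fill_assignment (cone_count - 8) large.dropLast med small (drone_list ++ [large.getLast!])
    else cone_count
  else cone_count
termination_by small.length + med.length + large.length
decreasing_by all_goals (simp_all [List.length_dropLast]; try omega)

-- ===== PORT B =====
-- port of Source B: three early returns and closed-form pop counts; the list
-- mutations in Source B are side effects that do not influence the returned value
def fill_assignment_alt (cone_count : Int) (large : List Int) (med : List Int) (small : List Int) (drone_list : List Int) : Int :=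
  if cone_count < 0 then cone_count
  else
    let ks := min ((small.length : Int)) (cone_count + 1)
    let c1 := cone_count - ks
    if c1 < 0 then c1
    else
      let km := min ((med.length : Int)) (PySem.Int.floordiv c1 4 + 1)
      let c2 := c1 - 4 * km
      if c2 < 0 then c2
      else
        let kl := min ((large.length : Int)) (PySem.Int.floordiv c2 8 + 1)
        c2 - 8 * kl

-- ===== PRECONDITION & SPEC =====
def Spec_fill_assignment (cone_count : Int) (large : List Int) (med : List Int) (small : List Int) (drone_list : List Int) (out : Int) : Prop := out = fill_assignment_alt cone_count large med small drone_list
instance (cone_count : Int) (large : List Int) (med : List Int) (small : List Int) (drone_list : List Int) (out : Int) : Decidable (Spec_fill_assignment cone_count large med small drone_list out) := by unfold Spec_fill_assignment; infer_instance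

-- ===== CLAIM (what is proved, stated in full; the proofs are below) =====
def Claim_equal_fill_assignment : Prop := ∀ (cone_count : Int) (large : List Int) (med : List Int) (small : List Int) (drone_list : List Int), Dom_fill_assignment cone_count large med small drone_list → Spec_fill_assignment cone_count large med small drone_list (fill_assignment cone_count large med small drone_list)

-- ===== LEMMAS AND PROOFS =====

theorem fa_neg (cone_count : Int) (l m s dl : List Int) (h : cone_count < 0) :
    fill_assignment cone_count l m s dl = cone_count := by
  unfold fill_assignment; simp [not_le.mpr h]

theorem fa_empty (cone_count : Int) (dl : List Int) :
    fill_assignment cone_count [] [] [] dl = cone_count := by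
  unfold fill_assignment; simp

-- small phase: consume min(len(small), cc+1) small drones
theorem fa_small (s : List Int) : ∀ (cc : Int) (l m dl : List Int), 0 ≤ cc →
    fill_assignment cc l m s dl =
      (let c1 := cc - min ((s.length : Int)) (cc + 1);
       if 0 ≤ c1 then fill_assignment c1 l m [] (dl ++ s.reverse) else c1) := by
  induction s using List.reverseRecOn with
  | nil =>
    intro cc l m dl h
    have hm : min ((0:Int)) (cc + 1) = 0 := by omega
    simp [h, hm]
  | append_singleton s a ih =>
    intro cc l m dl h
    have step : fill_assignment cc l m (s ++ [a]) dl =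
        fill_assignment (cc - 1) l m s (dl ++ [a]) := by
      rw [fill_assignment]; simp [h]
    rw [step]
    by_cases h1 : 0 ≤ cc - 1
    · rw [ih _ l m (dl ++ [a]) h1]
      have hmin : min ((s.length : Int)) (cc - 1 + 1) + 1 =
          min (((s ++ [a]).length : Int)) (cc + 1) := by
        simp only [List.length_append, List.length_cons, List.length_nil]
        push_cast; omega
      simp only []
      have harg : cc - 1 - min ((s.length : Int)) (cc - 1 + 1) =
          cc - min (((s ++ [a]).length : Int)) (cc + 1) := by omega
      rw [harg]
      simp [List.reverse_append]
    · -- cc = 0: the single pop sends the counter to -1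
      have hcc : cc = 0 := by omega
      subst hcc
      rw [fa_neg _ _ _ _ _ (by norm_num)]
      have : ¬ (0 : Int) ≤ 0 - min (((s ++ [a]).length : Int)) (0 + 1) := by
        simp only [List.length_append, List.length_cons, List.length_nil]
        push_cast; omega
      simp only [this, if_false]
      simp only [List.length_append, List.length_cons, List.length_nil]
      push_cast; omega

-- medium phase (small exhausted): consume min(len(med), cc/4 + 1) medium drones
theorem fa_med (m : List Int) : ∀ (cc : Int) (l dl : List Int), 0 ≤ cc →
    fill_assignment cc l m [] dl =
      (let c1 := cc - 4 * min ((m.length : Int)) (cc / 4 + 1);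
       if 0 ≤ c1 then fill_assignment c1 l [] [] (dl ++ m.reverse) else c1) := by
  induction m using List.reverseRecOn with
  | nil =>
    intro cc l dl h
    have : min (0 : Int) (cc / 4 + 1) = 0 := by omega
    simp [this, h]
  | append_singleton m a ih =>
    intro cc l dl h
    have step : fill_assignment cc l (m ++ [a]) [] dl =
        fill_assignment (cc - 4) l m [] (dl ++ [a]) := by
      rw [fill_assignment]; simp [h]
    rw [step]
    by_cases h1 : 0 ≤ cc - 4
    · rw [ih _ l (dl ++ [a]) h1]
      have hmin : 4 * min ((m.length : Int)) ((cc - 4) / 4 + 1) + 4 =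
          4 * min (((m ++ [a]).length : Int)) (cc / 4 + 1) := by
        simp only [List.length_append, List.length_cons, List.length_nil]
        push_cast; omega
      simp only []
      have harg : cc - 4 - 4 * min ((m.length : Int)) ((cc - 4) / 4 + 1) =
          cc - 4 * min (((m ++ [a]).length : Int)) (cc / 4 + 1) := by omega
      rw [harg]
      simp [List.reverse_append]
    · have h4 : cc < 4 := by omega
      rw [fa_neg _ _ _ _ _ (by omega)]
      have hdiv : cc / 4 = 0 := by omega
      have : ¬ (0 : Int) ≤ cc - 4 * min (((m ++ [a]).length : Int)) (cc / 4 + 1) := by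
        simp only [List.length_append, List.length_cons, List.length_nil, hdiv]
        push_cast; omega
      simp only [this, if_false]
      simp only [List.length_append, List.length_cons, List.length_nil, hdiv]
      push_cast; omega

-- large phase (small and med exhausted): consume min(len(large), cc/8 + 1) large drones
theorem fa_large (l : List Int) : ∀ (cc : Int) (dl : List Int), 0 ≤ cc →
    fill_assignment cc l [] [] dl = cc - 8 * min ((l.length : Int)) (cc / 8 + 1) := by
  induction l using List.reverseRecOn with
  | nil =>
    intro cc dl h
    have : min (0 : Int) (cc / 8 + 1) = 0 := by omega
    rw [fa_empty]; simp [this]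
  | append_singleton l a ih =>
    intro cc dl h
    have step : fill_assignment cc (l ++ [a]) [] [] dl =
        fill_assignment (cc - 8) l [] [] (dl ++ [a]) := by
      rw [fill_assignment]; simp [h]
    rw [step]
    by_cases h1 : 0 ≤ cc - 8
    · rw [ih _ (dl ++ [a]) h1]
      simp only [List.length_append, List.length_cons, List.length_nil]
      push_cast; omega
    · rw [fa_neg _ _ _ _ _ (by omega)]
      have hdiv : cc / 8 = 0 := by omega
      simp only [List.length_append, List.length_cons, List.length_nil, hdiv]
      push_cast; omega

-- ===== VERDICT (by name: the statement is the Claim_ definition above) =====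
theorem fill_assignment_spec : Claim_equal_fill_assignment := by
  intro cc l m s dl _
  unfold Spec_fill_assignment fill_assignment_alt
  by_cases h0 : cc < 0
  · rw [fa_neg _ _ _ _ _ h0, if_pos h0]
  · have h0' : 0 ≤ cc := by omega
    rw [fa_small s cc l m dl h0', if_neg h0]
    simp only []
    set c1 := cc - min ((s.length : Int)) (cc + 1) with hc1
    by_cases h1 : 0 ≤ c1
    · rw [if_pos h1, fa_med m c1 l (dl ++ s.reverse) h1,
        if_neg (not_lt.mpr h1),
        PySem.Int.floordiv_eq_ediv_of_pos (by norm_num : (0:Int) < 4)]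
      simp only []
      set c2 := c1 - 4 * min ((m.length : Int)) (c1 / 4 + 1) with hc2
      by_cases h2 : 0 ≤ c2
      · rw [if_pos h2, fa_large l c2 _ h2, if_neg (not_lt.mpr h2),
          PySem.Int.floordiv_eq_ediv_of_pos (by norm_num : (0:Int) < 8)]
      · rw [if_neg h2, if_pos (by omega : c2 < 0)]
    · rw [if_neg h1, if_pos (by omega : c1 < 0)]
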